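-- pv_equiv track=rewrite | github.com/Egorlop/nir | database_func/mes/mes_9.py | parse_mes_9
-- ===== SOURCE A (Python) =====
-- def parse_mes_9(data):
--     offset = 0
--     mass = {}
--     names = {}
--     mass['ДЕНЬ'] = int(data[offset], 16)
--     offset += 1
--     mass['СЧСРОК'] = int(data[offset], 16)
--     offset += 1
--     for i in range(1):
--         if len(data) > offset+1:
--             mass['СРОКНАБЛ' + str(i + 1)] = int(data[offset], 16)
--             offset += 1
--             mass['СЧАЯ' + str(i + 1)] = int(data[offset], 16)
--             offset += 1
--             for k in range(20):
--                 if len(data) > offset + 11: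
--                     mass['АЯВЛВИД'+ str(i + 1) + str(k + 1)] = int(data[offset], 16)
--                     offset += 1
--                     mass['(АЯВЛВИД)'+ str(i + 1) + str(k + 1)] = int(data[offset], 16)
--                     offset += 1
--                     mass['АЯИНТЕНС'+ str(i + 1) + str(k + 1)] = int(data[offset], 16)
--                     offset += 1
--                     mass['(АЯИНТЕНС)'+ str(i + 1) + str(k + 1)] = int(data[offset], 16)
--                     offset += 1
--                     mass['АЯВРЕМЯН'+ str(i + 1) + str(k + 1)] = int(data[offset]+data[offset+1], 16)
--                     offset += 2
--                     mass['(АЯВРЕМЯН)'+ str(i + 1) + str(k + 1)] = int(data[offset], 16)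
--                     offset += 1
--                     mass['АЯВРЕМЯК'+ str(i + 1) + str(k + 1)] = int(data[offset]+data[offset+1], 16)
--                     offset += 2
--                     mass['(АЯВРЕМЯК)Q'+ str(i + 1) + str(k + 1)] = int(data[offset], 16)
--                     offset += 1
--                     mass['(АЯВРЕМЯК)'+ str(i + 1) + str(k + 1)] = int(data[offset], 16)
--                     offset += 1
--                 else:
--                     break
--         else:
--             break
--     return mass,names
-- ===== SOURCE B (Python) =====
-- def parse_mes_9(data):
--     # Staged parse: collect (key, hex-token) pairs by slicing data into 11-token
--     # records (no running offset), then build the dict in one comprehension.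
--     pairs = [('ДЕНЬ', data[0]), ('СЧСРОК', data[1])]
--     n = len(data)
--     if n > 3:
--         pairs += [('СРОКНАБЛ1', data[2]), ('СЧАЯ1', data[3])]
--         keys = ['АЯВЛВИД', '(АЯВЛВИД)', 'АЯИНТЕНС', '(АЯИНТЕНС)', 'АЯВРЕМЯН',
--                 '(АЯВРЕМЯН)', 'АЯВРЕМЯК', '(АЯВРЕМЯК)Q', '(АЯВРЕМЯК)']
--         for k in range(min(20, (n - 5) // 11)):
--             r = data[4 + 11 * k: 15 + 11 * k]
--             vals = [r[0], r[1], r[2], r[3], r[4] + r[5], r[6], r[7] + r[8], r[9], r[10]]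
--             pairs += [(p + '1' + str(k + 1), v) for p, v in zip(keys, vals)]
--     return {key: int(v, 16) for key, v in pairs}, {}
-- ===== Notes on version B (the rewrite author's own statement) =====
-- stated objective: alternative
-- what changed: B parses in stages with no running offset or per-iteration guards: it slices the data into 11-token records, zips each record's fields with a key list to collect (key, hex-token) pairs, and only then builds the dict in one final conversion pass, whereas A threads an offset through interleaved guarded inserts.
import Mathlib
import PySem

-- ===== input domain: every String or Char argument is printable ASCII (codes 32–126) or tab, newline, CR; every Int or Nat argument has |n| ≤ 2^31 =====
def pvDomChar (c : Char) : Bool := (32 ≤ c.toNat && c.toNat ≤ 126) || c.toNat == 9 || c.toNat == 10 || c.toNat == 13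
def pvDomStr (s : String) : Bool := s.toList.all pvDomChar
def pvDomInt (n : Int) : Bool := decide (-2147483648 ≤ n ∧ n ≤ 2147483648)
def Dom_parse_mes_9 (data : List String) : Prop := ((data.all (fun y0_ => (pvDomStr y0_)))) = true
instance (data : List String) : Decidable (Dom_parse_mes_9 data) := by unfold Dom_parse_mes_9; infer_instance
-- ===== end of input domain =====

-- B is a staged parse: it first collects (key, hex-token) pairs — slicing the data into
-- 11-token records instead of advancing an offset, zipping a key list with each record's
-- fields — and only then converts everything into the dict in one final pass.

-- shared totalized primitives: data[i] (IndexError → "") and int(s, 16) (ValueError → 0);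
-- Pre_ excludes every input on which either default would be used.
def pvGetS (xs : List String) (i : Int) : String := (PySem.List.pyGet? xs i).getD ""
def pvHex (s : String) : Int := (PySem.Int.ofStrBase? s 16).getD 0

-- ===== PORT A =====
-- A's inner 'for k in range(20)' with its per-iteration guard, break, and running offset
def pvLoopA (data : List String) (i : Int) : Nat → Int → Int → PySem.Dict String Int → PySem.Dict String Int
  | 0, _, _, m => m
  | fuel+1, k, off, m =>
    if (data.length : Int) > off + 11 then
      let m := m.insert ("АЯВЛВИД" ++ PySem.Int.toStr (i+1) ++ PySem.Int.toStr (k+1)) (pvHex (pvGetS data off))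
      let m := m.insert ("(АЯВЛВИД)" ++ PySem.Int.toStr (i+1) ++ PySem.Int.toStr (k+1)) (pvHex (pvGetS data (off+1)))
      let m := m.insert ("АЯИНТЕНС" ++ PySem.Int.toStr (i+1) ++ PySem.Int.toStr (k+1)) (pvHex (pvGetS data (off+2)))
      let m := m.insert ("(АЯИНТЕНС)" ++ PySem.Int.toStr (i+1) ++ PySem.Int.toStr (k+1)) (pvHex (pvGetS data (off+3)))
      let m := m.insert ("АЯВРЕМЯН" ++ PySem.Int.toStr (i+1) ++ PySem.Int.toStr (k+1)) (pvHex (pvGetS data (off+4) ++ pvGetS data (off+5)))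
      let m := m.insert ("(АЯВРЕМЯН)" ++ PySem.Int.toStr (i+1) ++ PySem.Int.toStr (k+1)) (pvHex (pvGetS data (off+6)))
      let m := m.insert ("АЯВРЕМЯК" ++ PySem.Int.toStr (i+1) ++ PySem.Int.toStr (k+1)) (pvHex (pvGetS data (off+7) ++ pvGetS data (off+8)))
      let m := m.insert ("(АЯВРЕМЯК)Q" ++ PySem.Int.toStr (i+1) ++ PySem.Int.toStr (k+1)) (pvHex (pvGetS data (off+9)))
      let m := m.insert ("(АЯВРЕМЯК)" ++ PySem.Int.toStr (i+1) ++ PySem.Int.toStr (k+1)) (pvHex (pvGetS data (off+10)))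
      pvLoopA data i fuel (k+1) (off+11) m
    else m

def parse_mes_9 (data : List String) : (List (String × Int)) × (List (String × Int)) :=
  let offset : Int := 0
  let mass : PySem.Dict String Int := PySem.Dict.empty
  let names : PySem.Dict String Int := PySem.Dict.empty
  let mass := mass.insert "ДЕНЬ" (pvHex (pvGetS data offset))
  let offset := offset + 1
  let mass := mass.insert "СЧСРОК" (pvHex (pvGetS data offset))
  let offset := offset + 1
  -- for i in range(1): exactly one iteration, i = 0
  let i : Int := 0
  let mass :=
    if (data.length : Int) > offset + 1 then
      let mass := mass.insert ("СРОКНАБЛ" ++ PySem.Int.toStr (i+1)) (pvHex (pvGetS data offset))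
      let offset := offset + 1
      let mass := mass.insert ("СЧАЯ" ++ PySem.Int.toStr (i+1)) (pvHex (pvGetS data offset))
      let offset := offset + 1
      pvLoopA data i 20 0 offset mass
    else mass
  (mass.items, names.items)

-- ===== PORT B =====
def pvKeys : List String :=
  ["АЯВЛВИД", "(АЯВЛВИД)", "АЯИНТЕНС", "(АЯИНТЕНС)", "АЯВРЕМЯН",
   "(АЯВРЕМЯН)", "АЯВРЕМЯК", "(АЯВРЕМЯК)Q", "(АЯВРЕМЯК)"]

-- the (key, token) pairs of block k: slice out the 11-token record, zip with the key list
def pvBlockPairs (data : List String) (k : Int) : List (String × String) :=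
  let r := PySem.List.slice data (some (4 + 11*k)) (some (15 + 11*k))
  let vals := [pvGetS r 0, pvGetS r 1, pvGetS r 2, pvGetS r 3,
               pvGetS r 4 ++ pvGetS r 5, pvGetS r 6,
               pvGetS r 7 ++ pvGetS r 8, pvGetS r 9, pvGetS r 10]
  (pvKeys.zip vals).map (fun pv => (pv.1 ++ "1" ++ PySem.Int.toStr (k+1), pv.2))

def parse_mes_9_alt (data : List String) : (List (String × Int)) × (List (String × Int)) :=
  let pairs : List (String × String) := [("ДЕНЬ", pvGetS data 0), ("СЧСРОК", pvGetS data 1)]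
  let n : Int := data.length
  let pairs :=
    if n > 3 then
      let pairs := pairs ++ [("СРОКНАБЛ1", pvGetS data 2), ("СЧАЯ1", pvGetS data 3)]
      (PySem.List.pyRange 0 (min 20 (PySem.Int.floordiv (n - 5) 11)) 1).foldl
        (fun ps k => ps ++ pvBlockPairs data k) pairs
    else pairs
  ((pairs.foldl (fun d kv => d.insert kv.1 (pvHex kv.2)) PySem.Dict.empty).items, [])

-- ===== PRECONDITION & SPEC =====
def pvHexOk (s : String) : Prop := (PySem.Int.ofStrBase? s 16).isSome = true
-- exactly the inputs on which the Python A returns: every field it actually reads parses as base-16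
def Pre_parse_mes_9 (data : List String) : Prop :=
  2 ≤ data.length ∧ pvHexOk (data.getD 0 "") ∧ pvHexOk (data.getD 1 "") ∧
  (4 ≤ data.length →
    pvHexOk (data.getD 2 "") ∧ pvHexOk (data.getD 3 "") ∧
    ∀ k : Nat, k < 20 → 16 + 11*k ≤ data.length →
      pvHexOk (data.getD (4+11*k) "") ∧ pvHexOk (data.getD (5+11*k) "") ∧
      pvHexOk (data.getD (6+11*k) "") ∧ pvHexOk (data.getD (7+11*k) "") ∧
      pvHexOk (data.getD (8+11*k) "" ++ data.getD (9+11*k) "") ∧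
      pvHexOk (data.getD (10+11*k) "") ∧
      pvHexOk (data.getD (11+11*k) "" ++ data.getD (12+11*k) "") ∧
      pvHexOk (data.getD (13+11*k) "") ∧ pvHexOk (data.getD (14+11*k) ""))
instance (data : List String) : Decidable (Pre_parse_mes_9 data) := by
  unfold Pre_parse_mes_9 pvHexOk; infer_instance
def pvWitness_parse_mes_9 : List String := ["1f", "2"]
def Spec_parse_mes_9 (data : List String) (out : (List (String × Int)) × (List (String × Int))) : Prop := out = parse_mes_9_alt data
instance (data : List String) (out : (List (String × Int)) × (List (String × Int))) : Decidable (Spec_parse_mes_9 data out) := by unfold Spec_parse_mes_9; infer_instance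

-- ===== CLAIM (what is proved, stated in full; the proofs are below) =====
def Claim_equal_parse_mes_9 : Prop := ∀ (data : List String), Dom_parse_mes_9 data → Pre_parse_mes_9 data → Spec_parse_mes_9 data (parse_mes_9 data)

-- ===== LEMMAS AND PROOFS =====

-- the final dict-building pass of B, as a function of the pair list
def pvDictOf (m : PySem.Dict String Int) (ps : List (String × String)) : PySem.Dict String Int :=
  ps.foldl (fun d kv => d.insert kv.1 (pvHex kv.2)) m

lemma pvDictOf_append (m : PySem.Dict String Int) (xs ys : List (String × String)) :
    pvDictOf m (xs ++ ys) = pvDictOf (pvDictOf m xs) ys := by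
  simp [pvDictOf, List.foldl_append]

-- how many block iterations A's guard admits starting from offset `off`
def pvCnt (data : List String) (off : Int) : Nat :=
  if (data.length : Int) ≥ off + 12 then ((data.length : Int) - off - 12).toNat / 11 + 1 else 0

lemma pvCnt_step (data : List String) (off : Int) (h : (data.length : Int) > off + 11) :
    pvCnt data off = pvCnt data (off + 11) + 1 := by
  unfold pvCnt; split_ifs <;> omega

lemma pvCnt_zero (data : List String) (off : Int) (h : ¬ (data.length : Int) > off + 11) :
    pvCnt data off = 0 := by
  unfold pvCnt; split_ifs with h1 <;> omega

-- reading field j of the sliced record = reading data at 4+11k+j directly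
lemma pvGetS_slice (data : List String) (k j : Nat) (hj : j < 11) :
    pvGetS (PySem.List.slice data (some (4 + 11*(k:Int))) (some (15 + 11*(k:Int)))) (j:Int)
      = pvGetS data (4 + 11*(k:Int) + (j:Int)) := by
  have h4 : (4 + 11*(k:Int)) = ((4 + 11*k : Nat) : Int) := by push_cast; ring
  have h15 : (15 + 11*(k:Int)) = ((4 + 11*k : Nat) : Int) + ((11:Nat):Int) := by push_cast; ring
  have hidx : (4 + 11*(k:Int) + (j:Int)) = ((4 + 11*k + j : Nat) : Int) := by push_cast; ring
  rw [hidx, h4, h15, PySem.List.slice_natCast_add]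
  simp only [pvGetS, PySem.List.pyGet?_natCast]
  rw [List.getElem?_take_of_lt hj, List.getElem?_drop]

-- the 9 interleaved inserts of one A-block = pvDictOf of B's block-pair list
lemma pvBlock_insert (data : List String) (k : Nat) (m : PySem.Dict String Int) :
    pvDictOf m (pvBlockPairs data (k:Int)) =
      (((((((((m.insert ("АЯВЛВИД" ++ PySem.Int.toStr ((0:Int)+1) ++ PySem.Int.toStr ((k:Int)+1)) (pvHex (pvGetS data (4+11*(k:Int))))).insert
        ("(АЯВЛВИД)" ++ PySem.Int.toStr ((0:Int)+1) ++ PySem.Int.toStr ((k:Int)+1)) (pvHex (pvGetS data (4+11*(k:Int)+1)))).insert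
        ("АЯИНТЕНС" ++ PySem.Int.toStr ((0:Int)+1) ++ PySem.Int.toStr ((k:Int)+1)) (pvHex (pvGetS data (4+11*(k:Int)+2)))).insert
        ("(АЯИНТЕНС)" ++ PySem.Int.toStr ((0:Int)+1) ++ PySem.Int.toStr ((k:Int)+1)) (pvHex (pvGetS data (4+11*(k:Int)+3)))).insert
        ("АЯВРЕМЯН" ++ PySem.Int.toStr ((0:Int)+1) ++ PySem.Int.toStr ((k:Int)+1)) (pvHex (pvGetS data (4+11*(k:Int)+4) ++ pvGetS data (4+11*(k:Int)+5)))).insert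
        ("(АЯВРЕМЯН)" ++ PySem.Int.toStr ((0:Int)+1) ++ PySem.Int.toStr ((k:Int)+1)) (pvHex (pvGetS data (4+11*(k:Int)+6)))).insert
        ("АЯВРЕМЯК" ++ PySem.Int.toStr ((0:Int)+1) ++ PySem.Int.toStr ((k:Int)+1)) (pvHex (pvGetS data (4+11*(k:Int)+7) ++ pvGetS data (4+11*(k:Int)+8)))).insert
        ("(АЯВРЕМЯК)Q" ++ PySem.Int.toStr ((0:Int)+1) ++ PySem.Int.toStr ((k:Int)+1)) (pvHex (pvGetS data (4+11*(k:Int)+9)))).insert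
        ("(АЯВРЕМЯК)" ++ PySem.Int.toStr ((0:Int)+1) ++ PySem.Int.toStr ((k:Int)+1)) (pvHex (pvGetS data (4+11*(k:Int)+10)))) := by
  have g : ∀ j : Nat, j < 11 →
      pvGetS (PySem.List.slice data (some (4 + 11*(k:Int))) (some (15 + 11*(k:Int)))) (j:Int)
        = pvGetS data (4 + 11*(k:Int) + (j:Int)) := fun j hj => pvGetS_slice data k j hj
  have t1 : PySem.Int.toStr ((0:Int)+1) = "1" := by decide
  have e0 := g 0 (by omega); have e1 := g 1 (by omega); have e2 := g 2 (by omega)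
  have e3 := g 3 (by omega); have e4 := g 4 (by omega); have e5 := g 5 (by omega)
  have e6 := g 6 (by omega); have e7 := g 7 (by omega); have e8 := g 8 (by omega)
  have e9 := g 9 (by omega); have e10 := g 10 (by omega)
  push_cast at e0 e1 e2 e3 e4 e5 e6 e7 e8 e9 e10
  simp only [add_zero] at e0
  simp only [pvBlockPairs, pvKeys, List.zip, List.zipWith, List.map, pvDictOf, List.foldl, t1]
  rw [e0, e1, e2, e3, e4, e5, e6, e7, e8, e9, e10]

-- A's guarded loop at offset 4+11k = pvDictOf of the concatenated block pairs of B
lemma loop_eq (data : List String) (fuel : Nat) : ∀ (k : Nat) (m : PySem.Dict String Int),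
    pvLoopA data 0 fuel (k:Int) (4 + 11*(k:Int)) m =
      pvDictOf m ((PySem.List.pyRange (k:Int) ((k:Int) + (min fuel (pvCnt data (4 + 11*(k:Int))) : Nat)) 1).flatMap (pvBlockPairs data)) := by
  induction fuel with
  | zero =>
    intro k m
    simp [pvLoopA, pvDictOf]
  | succ n ih =>
    intro k m
    by_cases h : (data.length : Int) > (4 + 11*(k:Int)) + 11
    · have hc := pvCnt_step data (4 + 11*(k:Int)) h
      have hlen : 16 + 11*k ≤ data.length := by omega
      have hmin : (min (n+1) (pvCnt data (4 + 11*(k:Int))) : Nat)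
          = (min n (pvCnt data (4 + 11*(k:Int) + 11)) : Nat) + 1 := by omega
      have hcons : PySem.List.pyRange (k:Int) ((k:Int) + ((min (n+1) (pvCnt data (4 + 11*(k:Int))) : Nat) : Int)) 1
          = (k:Int) :: PySem.List.pyRange ((k:Int)+1) ((k:Int) + ((min (n+1) (pvCnt data (4 + 11*(k:Int))) : Nat) : Int)) 1 := by
        apply PySem.List.pyRange_one_cons; omega
      rw [hcons]
      simp only [List.flatMap_cons]
      rw [pvDictOf_append, pvBlock_insert data k m]
      simp only [pvLoopA, if_pos h]
      have e1 : ((k:Int)+1) = (((k+1:Nat)):Int) := by push_cast; ring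
      have e2 : (4 + 11*(k:Int) + 11) = (4 + 11*(((k+1:Nat)):Int)) := by push_cast; ring
      have e3 : ((k:Int) + ((min (n+1) (pvCnt data (4 + 11*(k:Int))) : Nat) : Int))
          = (((k+1:Nat)):Int) + ((min n (pvCnt data (4 + 11*(((k+1:Nat)):Int))) : Nat) : Int) := by
        rw [← e2]; push_cast; omega
      rw [e1, e2, e3, ih (k+1)]
    · rw [pvCnt_zero data _ h]
      simp [pvLoopA, if_neg h, pvDictOf]

-- B's block count equals what A's guard admits (the pyRange is the same list)
lemma range_eq (data : List String) (h : (data.length : Int) > 3) :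
    PySem.List.pyRange 0 (min 20 (PySem.Int.floordiv ((data.length : Int) - 5) 11)) 1
      = PySem.List.pyRange 0 (0 + ((min 20 (pvCnt data (4 + 11*((0:Nat):Int))) : Nat) : Int)) 1 := by
  rw [PySem.Int.floordiv_eq_ediv_of_pos (by omega)]
  unfold pvCnt
  split_ifs with h1
  · congr 1; push_cast; omega
  · have : ((data.length : Int) - 5) / 11 ≤ 0 := by omega
    rw [PySem.List.pyRange_one_eq_nil (by omega), PySem.List.pyRange_one_eq_nil (by push_cast; omega)]

-- ===== VERDICT (by name: the statement is the Claim_ definition above) =====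
theorem parse_mes_9_spec : Claim_equal_parse_mes_9 := by
  intro data _ _
  unfold Spec_parse_mes_9 parse_mes_9 parse_mes_9_alt
  simp only []
  by_cases h : (data.length : Int) > 0 + 1 + 1 + 1
  · rw [if_pos h, if_pos (by omega : (data.length : Int) > 3)]
    rw [range_eq data (by omega)]
    have hl := loop_eq data 20 0
        ((((PySem.Dict.empty.insert "ДЕНЬ" (pvHex (pvGetS data 0))).insert "СЧСРОК" (pvHex (pvGetS data (0+1)))).insert
            ("СРОКНАБЛ" ++ PySem.Int.toStr ((0:Int)+1)) (pvHex (pvGetS data (0+1+1)))).insert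
            ("СЧАЯ" ++ PySem.Int.toStr ((0:Int)+1)) (pvHex (pvGetS data (0+1+1+1))))
    norm_num at hl ⊢
    rw [hl]
    have k1 : ("СРОКНАБЛ" ++ PySem.Int.toStr 1) = "СРОКНАБЛ1" := by decide
    have k2 : ("СЧАЯ" ++ PySem.Int.toStr 1) = "СЧАЯ1" := by decide
    rw [k1, k2]
    exact ⟨by simp [pvDictOf, List.flatMap_def], rfl⟩
  · rw [if_neg h, if_neg (by omega : ¬ (data.length : Int) > 3)]
    norm_num [pvDictOf]
    rfl
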